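-- pv_equiv track=rewrite | github.com/rishabh16196/hf-space-composer | scripts/measure_inference_latencies.py | parse_literal_values
-- ===== SOURCE A (Python) =====
-- from typing import Any, Dict, List, Optional
--
-- def parse_literal_values(type_str: str) -> List[str]:
--     """Parse 'Literal[\"A\", \"B\", \"C\"]' into ['A', 'B', 'C']."""
--     if not type_str or "Literal[" not in type_str:
--         return []
--     # Extract everything between Literal[ and last ]
--     try:
--         start = type_str.index("Literal[") + len("Literal[")
--         end = type_str.rindex("]")
--         inner = type_str[start:end]
--         # Simple CSV parse, handle quotes
--         values = []
--         current = ""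
--         in_quote = False
--         for ch in inner:
--             if ch in ("'", '"'):
--                 in_quote = not in_quote
--                 current += ch
--             elif ch == "," and not in_quote:
--                 v = current.strip().strip("'\"")
--                 if v:
--                     values.append(v)
--                 current = ""
--             else:
--                 current += ch
--         if current.strip():
--             values.append(current.strip().strip("'\""))
--         return values
--     except (ValueError, IndexError):
--         return []
-- ===== SOURCE B (Python) =====
-- from typing import List
--
--
-- def parse_literal_values(type_str: str) -> List[str]:
--     """Parse 'Literal["A", "B", "C"]' into ['A', 'B', 'C']."""
--     if not type_str or "Literal[" not in type_str:
--         return []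
--     try:
--         start = type_str.index("Literal[") + len("Literal[")
--         end = type_str.rindex("]")
--         inner = type_str[start:end]
--         # Split blindly on EVERY comma, then glue back the pieces that fell
--         # inside an open quote: a field is complete once its quote count is even.
--         fields = []
--         buf = None
--         for piece in inner.split(","):
--             buf = piece if buf is None else buf + "," + piece
--             if (buf.count("'") + buf.count('"')) % 2 == 0:
--                 fields.append(buf)
--                 buf = None
--         if buf is not None:
--             fields.append(buf)
--         # fields is never empty: split() always yields at least one piece.
--         values = []
--         for f in fields[:-1]:
--             v = f.strip().strip("'\"")
--             if v:
--                 values.append(v)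
--         last = fields[-1]
--         if last.strip():
--             values.append(last.strip().strip("'\""))
--         return values
--     except (ValueError, IndexError):
--         return []
-- ===== Notes on version B (the rewrite author's own statement) =====
-- stated objective: alternative
-- what changed: B replaces A's single character-by-character scan with an in_quote flag by split-then-repair: it splits the inner text on every comma with str.split, glues consecutive pieces back together while their accumulated quote count is odd, and then cleans the completed fields (all but the last filtered on the cleaned value, the last on its plain strip).
import Mathlib
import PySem

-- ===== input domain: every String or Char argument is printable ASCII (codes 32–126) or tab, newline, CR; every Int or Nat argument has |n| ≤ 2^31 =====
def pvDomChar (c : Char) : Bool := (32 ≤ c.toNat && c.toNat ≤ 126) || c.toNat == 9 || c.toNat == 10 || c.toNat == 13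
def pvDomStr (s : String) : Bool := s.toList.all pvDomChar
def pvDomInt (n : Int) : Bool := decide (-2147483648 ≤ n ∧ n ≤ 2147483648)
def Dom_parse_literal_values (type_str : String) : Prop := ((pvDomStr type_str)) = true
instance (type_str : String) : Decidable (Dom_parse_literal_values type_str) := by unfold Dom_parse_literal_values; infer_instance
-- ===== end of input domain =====

-- B replaces A's character scan with an in_quote flag by split-on-every-comma
-- followed by re-glueing the pieces whose accumulated quote count is odd; equal
-- return values, no speed claim.

-- v.strip().strip("'\"") — shared by both Pythons verbatim
def pvClean (cs : List Char) : List Char :=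
  PySem.Chars.stripChars (PySem.Chars.strip cs) ['\'', '"']

-- ===== PORT A =====
-- loop state: (values, current, in_quote)
def pvStepA (st : List String × List Char × Bool) (ch : Char) : List String × List Char × Bool :=
  if ch = '\'' ∨ ch = '"' then (st.1, st.2.1 ++ [ch], !st.2.2)
  else if ch = ',' ∧ st.2.2 = false then
    (if !(pvClean st.2.1).isEmpty then st.1 ++ [String.ofList (pvClean st.2.1)] else st.1, [], st.2.2)
  else (st.1, st.2.1 ++ [ch], st.2.2)

-- the code after the loop: if current.strip(): values.append(current.strip().strip("'\""))
def pvFinishA (st : List String × List Char × Bool) : List String :=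
  if !(PySem.Chars.strip st.2.1).isEmpty then st.1 ++ [String.ofList (pvClean st.2.1)] else st.1

def parse_literal_values (type_str : String) : List String :=
  if type_str.toList = [] ∨ PySem.Chars.isIn "Literal[".toList type_str.toList = false then []
  else if PySem.Chars.rfind type_str.toList "]".toList = -1 then []  -- rindex raises ValueError → except → []
  else
    pvFinishA ((PySem.List.slice type_str.toList
        (some (PySem.Chars.find type_str.toList "Literal[".toList + 8))
        (some (PySem.Chars.rfind type_str.toList "]".toList))).foldl pvStepA ([], [], false))

-- ===== PORT B =====
-- (buf.count("'") + buf.count('"')) % 2 == 0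
def pvQEven (buf : List Char) : Bool :=
  (PySem.Chars.count buf ['\''] + PySem.Chars.count buf ['"']) % 2 == 0

-- the body of B's merge loop; state = (fields, buf : Option)
def pvMergeStep (st : List (List Char) × Option (List Char)) (piece : List Char) :
    List (List Char) × Option (List Char) :=
  let buf := match st.2 with | none => piece | some b => b ++ ',' :: piece
  if pvQEven buf then (st.1 ++ [buf], none) else (st.1, some buf)

-- pass 1: inner.split(",") then merge; trailing open buf appended
def pvFields (inner : List Char) : List (List Char) :=
  let st := (PySem.Chars.splitOn inner [',']).foldl pvMergeStep ([], none)
  st.1 ++ (match st.2 with | none => [] | some b => [b])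

-- pass 2: fields[:-1] filtered on the cleaned value, fields[-1] on its plain strip
def pvEmitB (fields : List (List Char)) : List String :=
  (PySem.List.slice fields none (some (-1))).foldl
      (fun acc f => if !(pvClean f).isEmpty then acc ++ [String.ofList (pvClean f)] else acc) []
    ++ (match PySem.List.pyGet? fields (-1) with
        | some last =>
            if !(PySem.Chars.strip last).isEmpty then [String.ofList (pvClean last)] else []
        | none => [])  -- unreachable: split() yields at least one piece, so fields ≠ []

def parse_literal_values_alt (type_str : String) : List String :=
  if type_str.toList = [] ∨ PySem.Chars.isIn "Literal[".toList type_str.toList = false then []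
  else if PySem.Chars.rfind type_str.toList "]".toList = -1 then []  -- rindex raises ValueError → except → []
  else
    pvEmitB (pvFields (PySem.List.slice type_str.toList
        (some (PySem.Chars.find type_str.toList "Literal[".toList + 8))
        (some (PySem.Chars.rfind type_str.toList "]".toList))))

-- ===== PRECONDITION & SPEC =====
def Spec_parse_literal_values (type_str : String) (out : List String) : Prop := out = parse_literal_values_alt type_str
instance (type_str : String) (out : List String) : Decidable (Spec_parse_literal_values type_str out) := by unfold Spec_parse_literal_values; infer_instance

-- ===== CLAIM (what is proved, stated in full; the proofs are below) =====
def Claim_equal_parse_literal_values : Prop := ∀ (type_str : String), Dom_parse_literal_values type_str → Spec_parse_literal_values type_str (parse_literal_values type_str)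

-- ===== LEMMAS AND PROOFS =====

-- quote parity of a char list
def pvQOdd (cs : List Char) : Bool := decide (cs.countP (fun c => c = '\'' ∨ c = '"') % 2 = 1)

-- A's current at a piece boundary: an open buf still owes its separating comma
def pvBufCur (buf : Option (List Char)) : List Char :=
  match buf with | none => [] | some b => b ++ [',']

-- run B's merge fold from an arbitrary state and append the trailing open buf
def pvRun (st : List (List Char) × Option (List Char)) (ps : List (List Char)) : List (List Char) :=
  let st' := ps.foldl pvMergeStep st
  st'.1 ++ (match st'.2 with | none => [] | some b => [b])

-- A's emitted values for a list of non-trailing fields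
def pvEmitClosed (fields : List (List Char)) : List String :=
  (fields.filter (fun f => !(pvClean f).isEmpty)).map (fun f => String.ofList (pvClean f))

lemma pvCount_go_single (c : Char) : ∀ (l : List Char) (fuel acc : Nat), l.length ≤ fuel →
    PySem.Chars.count.go [c] fuel l acc = acc + l.count c := by
  intro l
  induction l with
  | nil => intro fuel acc _; cases fuel <;> simp [PySem.Chars.count.go]
  | cons ch rest ih =>
    intro fuel acc hf
    cases fuel with
    | zero => simp at hf
    | succ f =>
      rw [PySem.Chars.count.go]
      by_cases h : c = ch
      · subst h
        rw [if_pos (by simp)]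
        simp only [List.length_cons, List.length_nil, Nat.zero_add, List.drop_one, List.tail_cons]
        rw [ih f (acc+1) (by simpa using hf)]
        simp
        omega
      · rw [if_neg (by simp; exact fun hh => h hh)]
        rw [ih f acc (by simp at hf; omega)]
        simp [List.count_cons]
        intro hh; exact absurd hh.symm h

lemma pvCount_single (cs : List Char) (c : Char) : PySem.Chars.count cs [c] = cs.count c := by
  unfold PySem.Chars.count
  rw [if_neg (by simp)]
  simpa using pvCount_go_single c cs cs.length 0 le_rfl

lemma pvCountP_q (cs : List Char) :
    cs.countP (fun c => c = '\'' ∨ c = '"') = cs.count '\'' + cs.count '"' := by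
  induction cs with
  | nil => simp
  | cons ch rest ih =>
    simp only [List.countP_cons, List.count_cons, ih]
    by_cases h1 : ch = '\'' <;> by_cases h2 : ch = '"' <;> simp_all <;> omega

lemma pvNatParity (n : Nat) : ((n % 2 == 0) : Bool) = !decide (n % 2 = 1) := by
  rcases Nat.mod_two_eq_zero_or_one n with h | h <;> simp [h]

lemma pvQEven_odd (buf : List Char) : pvQEven buf = !pvQOdd buf := by
  unfold pvQEven pvQOdd
  rw [pvCount_single, pvCount_single, ← pvCountP_q, pvNatParity]

lemma pvModifyHead_id {α : Type} (l : List α) : l.modifyHead (fun x => x) = l := by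
  cases l <;> simp

lemma pvSplitOn_go_single (c : Char) : ∀ (l : List Char) (fuel : Nat) (cur : List Char)
    (acc : List (List Char)), l.length ≤ fuel →
    PySem.Chars.splitOn.go [c] fuel l cur acc
      = acc.reverse ++ (List.splitOnP (· == c) l).modifyHead (cur.reverse ++ ·) := by
  intro l
  induction l with
  | nil =>
    intro fuel cur acc _
    cases fuel <;> simp [PySem.Chars.splitOn.go, List.splitOnP_nil]
  | cons ch rest ih =>
    intro fuel cur acc hf
    cases fuel with
    | zero => simp at hf
    | succ f =>
      rw [PySem.Chars.splitOn.go]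
      by_cases h : c = ch
      · subst h
        rw [if_pos (by simp)]
        simp only [List.length_cons, List.length_nil, Nat.zero_add, List.drop_one, List.tail_cons]
        rw [ih f [] (cur.reverse :: acc) (by simpa using hf)]
        rw [List.splitOnP_cons]
        rw [if_pos (by simp)]
        simp [pvModifyHead_id]
      · rw [if_neg (by simp; exact fun hh => h hh)]
        rw [ih f (ch :: cur) acc (by simp at hf; omega)]
        rw [List.splitOnP_cons]
        rw [if_neg (by simp; exact fun hh => h hh.symm)]
        rw [List.modifyHead_modifyHead]
        have : ((fun x => cur.reverse ++ x) ∘ List.cons ch) = (fun x => (ch :: cur).reverse ++ x) := by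
          funext x; simp
        rw [this]

lemma pvModifyHead_nil_append {α : Type} (l : List (List α)) :
    l.modifyHead (fun x => [] ++ x) = l := by
  cases l <;> simp

lemma pvSplitOn_single (s : List Char) (c : Char) :
    PySem.Chars.splitOn s [c] = List.splitOnP (· == c) s := by
  unfold PySem.Chars.splitOn
  rw [pvSplitOn_go_single c s (s.length + 1) [] [] (by omega)]
  have : (List.splitOnP (· == c) s).modifyHead (fun x => List.reverse [] ++ x) = List.splitOnP (· == c) s := by
    simpa using pvModifyHead_nil_append (List.splitOnP (· == c) s)
  simpa using this

lemma pvNatFlip (n : Nat) : decide ((n + 1) % 2 = 1) = !decide (n % 2 = 1) := by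
  rcases Nat.mod_two_eq_zero_or_one n with h | h <;>
    · rw [show (n + 1) % 2 = (n % 2 + 1) % 2 from by omega]
      simp [h]

lemma pvQOdd_append_quote (xs : List Char) (c : Char) (h : c = '\'' ∨ c = '"') :
    pvQOdd (xs ++ [c]) = !pvQOdd xs := by
  simp only [pvQOdd, List.countP_append, List.countP_cons, List.countP_nil]
  rw [if_pos (by simpa using h)]
  simpa using pvNatFlip (xs.countP (fun c => c = '\'' ∨ c = '"'))

lemma pvQOdd_append_other (xs : List Char) (c : Char) (h : ¬ (c = '\'' ∨ c = '"')) :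
    pvQOdd (xs ++ [c]) = pvQOdd xs := by
  simp only [pvQOdd, List.countP_append, List.countP_cons, List.countP_nil]
  rw [if_neg (by simpa using h)]
  simp

lemma pvEmitB_append (fields : List (List Char)) (c : List Char) :
    pvEmitB (fields ++ [c])
      = pvEmitClosed fields
        ++ (if !(PySem.Chars.strip c).isEmpty then [String.ofList (pvClean c)] else []) := by
  have hslice : PySem.List.slice (fields ++ [c]) none (some (-1)) = fields := by
    simp [PySem.List.slice, PySem.List.clampIdx]
  have hget : PySem.List.pyGet? (fields ++ [c]) (-1) = some c := by
    simp [PySem.List.pyGet?, PySem.List.pyIdx?]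
  unfold pvEmitB pvEmitClosed
  rw [hslice, hget, PySem.List.foldl_append_if]
  simp

lemma pvEmitClosed_append (fields : List (List Char)) (b : List Char) :
    pvEmitClosed (fields ++ [b])
      = pvEmitClosed fields
        ++ (if !(pvClean b).isEmpty then [String.ofList (pvClean b)] else []) := by
  unfold pvEmitClosed
  rw [List.filter_append, List.map_append]
  by_cases h : (!(pvClean b).isEmpty) = true <;> simp [h]

lemma pvBufCur_merge (buf : Option (List Char)) (pre : List Char) :
    (match buf with | none => pre | some b => b ++ ',' :: pre) = pvBufCur buf ++ pre := by
  cases buf <;> simp [pvBufCur]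

lemma pvIte_push (vs : List String) (c : List Char) :
    (if (!(pvClean c).isEmpty) = true then vs ++ [String.ofList (pvClean c)] else vs)
      = vs ++ (if (!(pvClean c).isEmpty) = true then [String.ofList (pvClean c)] else []) := by
  split_ifs <;> simp

-- main invariant: A's inline scan equals B's split-merge-emit pipeline
lemma pv_main (inner : List Char) : ∀ (fields : List (List Char)) (buf : Option (List Char))
    (pre : List Char),
    pvFinishA (inner.foldl pvStepA (pvEmitClosed fields, pvBufCur buf ++ pre,
        pvQOdd (pvBufCur buf ++ pre)))
      = pvEmitB (pvRun (fields, buf) ((List.splitOnP (· == ',') inner).modifyHead (pre ++ ·))) := by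
  induction inner with
  | nil =>
    intro fields buf pre
    simp only [List.foldl_nil, List.splitOnP_nil, List.modifyHead, List.append_nil]
    unfold pvRun pvMergeStep
    simp only [List.foldl_cons, List.foldl_nil, pvBufCur_merge]
    by_cases hq : pvQEven (pvBufCur buf ++ pre) = true
    · rw [if_pos hq]
      rw [show ∀ (l : List (List Char)), (l, (none : Option (List Char))).1
            ++ (match (l, (none : Option (List Char))).2 with | none => [] | some b => [b]) = l
          from fun l => by simp]
      rw [pvEmitB_append]
      unfold pvFinishA
      split_ifs <;> simp
    · rw [if_neg hq]
      rw [show ∀ (l : List (List Char)) (b : List Char), (l, some b).1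
            ++ (match (l, some b).2 with | none => [] | some b => [b]) = l ++ [b]
          from fun l b => by simp]
      rw [pvEmitB_append]
      unfold pvFinishA
      split_ifs <;> simp
  | cons ch rest ih =>
    intro fields buf pre
    simp only [List.foldl_cons, pvStepA]
    by_cases h1 : ch = '\'' ∨ ch = '"'
    · rw [if_pos h1]
      rw [show (!pvQOdd (pvBufCur buf ++ pre)) = pvQOdd (pvBufCur buf ++ pre ++ [ch]) from
        (pvQOdd_append_quote _ ch h1).symm]
      have hih := ih fields buf (pre ++ [ch])
      rw [← List.append_assoc] at hih
      rw [hih]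
      have hch : (ch == ',') = false := by
        rcases h1 with h | h <;> simp [h]
      rw [List.splitOnP_cons, if_neg (show ¬ (ch == ',') = true from by simp [hch]),
        List.modifyHead_modifyHead]
      have : ((fun x => pre ++ x) ∘ List.cons ch) = (fun x => (pre ++ [ch]) ++ x) := by
        funext x; simp
      rw [this]
    · rw [if_neg h1]
      by_cases h2 : ch = ','
      · subst h2
        rw [List.splitOnP_cons, if_pos (show ((',' : Char) == ',') = true from rfl)]
        simp only [List.modifyHead]
        unfold pvRun
        rw [List.foldl_cons]
        simp only [pvMergeStep, pvBufCur_merge]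
        by_cases hq : pvQOdd (pvBufCur buf ++ pre) = false
        · rw [if_pos (show (True ∧ pvQOdd (pvBufCur buf ++ pre) = false) from ⟨trivial, hq⟩)]
          simp only [List.append_nil]
          rw [if_pos (show pvQEven (pvBufCur buf ++ pre) = true from by
            simp [pvQEven_odd, hq])]
          rw [pvIte_push, ← pvEmitClosed_append, hq]
          have hih := ih (fields ++ [pvBufCur buf ++ pre]) none []
          unfold pvRun at hih
          rw [pvModifyHead_nil_append] at hih
          exact hih
        · have hq' : pvQOdd (pvBufCur buf ++ pre) = true := by
            revert hq; cases pvQOdd (pvBufCur buf ++ pre) <;> simp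
          rw [if_neg (show ¬ (True ∧ pvQOdd (pvBufCur buf ++ pre) = false) from by
            simp [hq'])]
          simp only [List.append_nil]
          rw [if_neg (show ¬ pvQEven (pvBufCur buf ++ pre) = true from by
            simp [pvQEven_odd, hq'])]
          rw [hq']
          have hcomma : ¬ (',' = '\'' ∨ ',' = '"') := by simp
          have hih := ih fields (some (pvBufCur buf ++ pre)) []
          unfold pvRun at hih
          rw [pvModifyHead_nil_append] at hih
          simp only [List.append_nil] at hih
          rw [show pvBufCur (some (pvBufCur buf ++ pre)) = pvBufCur buf ++ pre ++ [','] from rfl] at hih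
          rw [pvQOdd_append_other _ ',' hcomma, hq'] at hih
          exact hih
      · rw [if_neg (show ¬ (ch = ',' ∧ pvQOdd (pvBufCur buf ++ pre) = false) from by
          simp [h2])]
        rw [show pvQOdd (pvBufCur buf ++ pre) = pvQOdd (pvBufCur buf ++ pre ++ [ch]) from
          (pvQOdd_append_other _ ch h1).symm]
        have hih := ih fields buf (pre ++ [ch])
        rw [← List.append_assoc] at hih
        rw [hih]
        rw [List.splitOnP_cons, if_neg (show ¬ (ch == ',') = true from by simp [h2]),
          List.modifyHead_modifyHead]
        have : ((fun x => pre ++ x) ∘ List.cons ch) = (fun x => (pre ++ [ch]) ++ x) := by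
          funext x; simp
        rw [this]

-- ===== VERDICT (by name: the statement is the Claim_ definition above) =====
theorem parse_literal_values_spec : Claim_equal_parse_literal_values := by
  intro type_str _hdom
  unfold Spec_parse_literal_values parse_literal_values parse_literal_values_alt
  split_ifs with h1 h2
  · rfl
  · rfl
  · unfold pvFields
    rw [pvSplitOn_single]
    have := pv_main (PySem.List.slice type_str.toList
        (some (PySem.Chars.find type_str.toList "Literal[".toList + 8))
        (some (PySem.Chars.rfind type_str.toList "]".toList))) [] none []
    unfold pvRun at this
    rw [pvModifyHead_nil_append] at this
    simpa [pvBufCur, pvEmitClosed, pvQOdd] using this
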